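-- pv_equiv track=rewrite | github.com/robyoung/pgpow | src/pgpow/explain.py | clean_headers_and_borders
-- ===== SOURCE A (Python) =====
-- def clean_headers_and_borders(lines: list[str]) -> list[str]:
--     found_separator = False
--     for i, line in enumerate(lines):
--         if line.strip() == "":
--             continue
--         if found_separator:
--             new_lines = lines[i:]
--             indented = len(line) - len(line.lstrip())
--             if indented > 0:
--                 return [line[indented:] for line in new_lines]
--             else:
--                 return new_lines
--         elif all(c == "-" for c in line.strip()):
--             found_separator = True
--             continue
--     return lines
-- ===== SOURCE B (Python) =====
-- def clean_headers_and_borders(lines: list[str]) -> list[str]: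
--     # Precompute the stripped lines and a boolean mask marking dash-only separator
--     # lines, then work with positions: index of the first separator, count of the
--     # blank lines after it, and one slice from there, dedented by the first line's indent.
--     stripped = [l.strip() for l in lines]
--     dash_mask = [s != "" and not s.strip("-") for s in stripped]
--     if True not in dash_mask:
--         return lines
--     sep = dash_mask.index(True)
--     pad = 0
--     for s in stripped[sep + 1:]:
--         if s != "":
--             break
--         pad += 1
--     tail = lines[sep + 1 + pad:]
--     if not tail:
--         return lines
--     indent = len(tail[0]) - len(tail[0].lstrip())
--     return [l[indent:] for l in tail]
-- ===== Notes on version B (the rewrite author's own statement) =====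
-- stated objective: alternative
-- what changed: Replaces A's flag-driven enumerate loop with a data-first formulation: precompute the stripped lines and a boolean separator mask, take the index of the first True, count the blank lines after it with one bounded loop, and return a single dedented slice from that position.
import Mathlib
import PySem

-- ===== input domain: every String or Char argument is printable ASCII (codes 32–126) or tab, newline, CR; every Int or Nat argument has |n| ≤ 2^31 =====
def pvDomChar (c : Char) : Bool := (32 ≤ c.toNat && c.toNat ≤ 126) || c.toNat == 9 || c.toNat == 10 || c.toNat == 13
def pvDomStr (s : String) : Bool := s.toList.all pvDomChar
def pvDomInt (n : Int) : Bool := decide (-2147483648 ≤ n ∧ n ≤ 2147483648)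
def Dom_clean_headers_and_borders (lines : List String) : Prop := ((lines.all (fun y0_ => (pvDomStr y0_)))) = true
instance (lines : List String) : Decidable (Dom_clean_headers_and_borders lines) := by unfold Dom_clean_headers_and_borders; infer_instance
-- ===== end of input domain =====

-- B replaces A's flag-driven scan with precomputed data: the stripped lines, a boolean
-- separator mask, the index of the mask's first True, a count of the blank lines after it,
-- and one dedented slice from that position; same behaviour (objective: alternative).

-- ===== PORT A =====
-- A's for-loop with its early returns: `none` = the loop fell through (Python then returns
-- `lines`); the current suffix `line :: rest` is exactly lines[i:] at index i.
def cleanAGo (found : Bool) : List String → Option (List String)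
  | [] => none
  | line :: rest =>
    if PySem.Str.strip line = "" then cleanAGo found rest
    else if found then
      let new_lines := line :: rest
      let indented : Int := PySem.Str.len line - PySem.Str.len (PySem.Str.lstrip line)
      some (if indented > 0 then new_lines.map (fun l => PySem.Str.slice l (some indented) none)
            else new_lines)
    else if (PySem.Str.strip line).toList.all (· == '-') then cleanAGo true rest
    else cleanAGo false rest

def clean_headers_and_borders (lines : List String) : List String :=
  (cleanAGo false lines).getD lines

-- ===== PORT B =====
-- the `for s in stripped[sep+1:]` loop of Source B: count the leading blank entries, breaking
-- at the first non-blank one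
def padCount : List String → Nat
  | [] => 0
  | s :: rest => if s ≠ "" then 0 else padCount rest + 1

def clean_headers_and_borders_alt (lines : List String) : List String :=
  let stripped := lines.map PySem.Str.strip
  let dash_mask := stripped.map (fun s => decide (s ≠ "") && (PySem.Str.stripChars s "-" == ""))
  match PySem.List.index? dash_mask true with
  | none => lines                               -- "if True not in dash_mask: return lines"
  | some sep =>
    let pad := padCount (PySem.List.slice stripped (some ((sep : Int) + 1)) none)
    let tail := PySem.List.slice lines (some ((sep : Int) + 1 + (pad : Int))) none
    match tail with
    | [] => lines                               -- "if not tail: return lines"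
    | t0 :: _ =>
      let indent : Int := PySem.Str.len t0 - PySem.Str.len (PySem.Str.lstrip t0)
      tail.map (fun l => PySem.Str.slice l (some indent) none)

-- ===== PRECONDITION & SPEC =====
def Spec_clean_headers_and_borders (lines : List String) (out : List String) : Prop := out = clean_headers_and_borders_alt lines
instance (lines : List String) (out : List String) : Decidable (Spec_clean_headers_and_borders lines out) := by unfold Spec_clean_headers_and_borders; infer_instance

-- ===== CLAIM (what is proved, stated in full; the proofs are below) =====
def Claim_equal_clean_headers_and_borders : Prop := ∀ (lines : List String), Dom_clean_headers_and_borders lines → Spec_clean_headers_and_borders lines (clean_headers_and_borders lines)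

-- ===== LEMMAS AND PROOFS =====

-- proof-layer middle form both ports are reduced to: "find the suffix after the separator,
-- skip blanks, dedent what is left by the first line's indent"
def findSep : List String → Option (List String)
  | [] => none
  | l :: rest =>
    if PySem.Str.strip l = "" then findSep rest
    else if (PySem.Str.strip l).toList.all (· == '-') then some rest
    else findSep rest

def skipBlank : List String → Option (List String)
  | [] => none
  | l :: rest => if PySem.Str.strip l = "" then skipBlank rest else some (l :: rest)

def dedentTail (content : List String) : List String :=
  match content with
  | [] => []
  | l :: tail =>
    let indent : Int := PySem.Str.len l - PySem.Str.len (PySem.Str.lstrip l)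
    (l :: tail).map (fun s => PySem.Str.slice s (some indent) none)

def specMid (lines : List String) : List String :=
  match findSep lines with
  | none => lines
  | some rest =>
    match skipBlank rest with
    | none => lines
    | some content => dedentTail content

-- A's post-separator phase is "skip blanks, then dedent" (dedentTail's unconditional map is
-- the identity when the indent is 0, which absorbs A's `indented > 0` branch)
lemma cleanAGo_true (ls : List String) :
    cleanAGo true ls = (skipBlank ls).map dedentTail := by
  induction ls with
  | nil => rfl
  | cons l rest ih =>
    by_cases h : PySem.Str.strip l = ""
    · simp [cleanAGo, skipBlank, h, ih]
    · have hlen : (PySem.Chars.lstrip l.toList).length ≤ l.toList.length := by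
        rw [PySem.Chars.lstrip]
        exact List.length_dropWhile_le _ _
      have hlstr : (PySem.Str.lstrip l).toList.length = (PySem.Chars.lstrip l.toList).length := by
        rw [PySem.Str.toList_lstrip]
      simp only [cleanAGo, skipBlank, h, if_false, if_true, Option.map_some, dedentTail,
        PySem.Str.len_eq]
      split_ifs with h1
      · rfl
      · have h0 : ((l.toList.length : Int) - ((PySem.Str.lstrip l).toList.length : Int)) = 0 := by
          omega
        rw [h0]
        have hid : ∀ s : String, PySem.Str.slice s (some 0) none = s := fun s => by
          simp [PySem.Str.slice]
        simp [hid]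

-- before the separator, A's loop is "find the separator, then the post-separator phase"
lemma cleanAGo_false (ls : List String) :
    cleanAGo false ls = (findSep ls).bind (cleanAGo true) := by
  induction ls with
  | nil => rfl
  | cons l rest ih =>
    simp only [cleanAGo, findSep, Bool.false_eq_true, if_false]
    split_ifs with h hd
    · exact ih
    · rfl
    · exact ih

lemma A_eq_specMid (lines : List String) :
    clean_headers_and_borders lines = specMid lines := by
  unfold clean_headers_and_borders specMid
  rw [cleanAGo_false]
  cases hf : findSep lines with
  | none => rfl
  | some rest =>
    simp only [Option.bind_some, cleanAGo_true]
    cases hs : skipBlank rest with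
    | none => rfl
    | some content => rfl

-- s.strip("-") is empty exactly when every character of s is a dash
lemma stripChars_dash_empty (cs : List Char) :
    (PySem.Chars.stripChars cs ['-'] = []) ↔ cs.all (· == '-') = true := by
  unfold PySem.Chars.stripChars
  simp only [List.reverse_eq_nil_iff, List.dropWhile_eq_nil_iff, List.mem_reverse, List.all_eq_true]
  constructor
  · intro h x hx
    have := List.takeWhile_append_dropWhile (p := fun c => [ '-' ].contains c) (l := cs)
    rw [← this] at hx
    rcases List.mem_append.mp hx with h1 | h1
    · have := List.mem_takeWhile_imp h1
      simpa using this
    · by_cases hd : List.dropWhile (fun c => ['-'].contains c) cs = []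
      · rw [hd] at h1; cases h1
      · have := h x h1
        simpa using this
  · intro h x hx
    have hnil : List.dropWhile (fun c => ['-'].contains c) cs = [] := by
      rw [List.dropWhile_eq_nil_iff]
      intro x hx; simpa using h x hx
    rw [hnil] at hx; cases hx

-- B's dash test ('s != "" and not s.strip("-")') agrees with A's "all characters are '-'" test
lemma dash_test (s : String) :
    (decide (s ≠ "") && (PySem.Str.stripChars s "-" == "")) =
      (decide (s ≠ "") && s.toList.all (· == '-')) := by
  by_cases h : s = ""
  · simp [h]
  · simp only [h, ne_eq, not_false_eq_true, decide_true, Bool.true_and]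
    have h1 : (PySem.Str.stripChars s "-" == "") = decide ((PySem.Str.stripChars s "-").toList = []) := by
      by_cases he : PySem.Str.stripChars s "-" = ""
      · simp [he]
      · have hne : (PySem.Str.stripChars s "-").toList ≠ [] := fun hnil => he (String.toList_eq_nil_iff.mp hnil)
        have h2 : (PySem.Str.stripChars s "-").toList = PySem.Chars.stripChars s.toList ['-'] := by simp
        rw [h2] at hne
        simp [beq_eq_false_iff_ne, he, hne]
    rw [h1, PySem.Str.toList_stripChars]
    have : ("-" : String).toList = ['-'] := by decide
    rw [this]
    rcases hb : s.toList.all (· == '-') with _ | _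
    · simp only [decide_eq_false_iff_not]
      rw [stripChars_dash_empty]; simp [hb]
    · simp only [decide_eq_true_eq]
      rw [stripChars_dash_empty]; exact hb

-- B's index?-over-mask search finds exactly findSep's suffix
lemma findSep_eq_index (lines : List String) :
    findSep lines =
      (PySem.List.index?
        (lines.map (fun l =>
          decide (PySem.Str.strip l ≠ "") && (PySem.Str.strip l).toList.all (· == '-'))) true).map
        (fun sep => lines.drop (sep + 1)) := by
  induction lines with
  | nil => rfl
  | cons l rest ih =>
    simp only [List.map_cons]
    by_cases hb : (decide (PySem.Str.strip l ≠ "") && (PySem.Str.strip l).toList.all (· == '-')) = true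
    · rw [hb, PySem.List.index?_cons_self]
      rcases Bool.and_eq_true_iff.mp hb with ⟨h1, h2⟩
      rw [decide_eq_true_eq] at h1
      simp only [findSep, if_neg h1, if_pos h2, Option.map_some, List.drop_succ_cons,
        List.drop_zero]
    · rw [Bool.not_eq_true] at hb
      rw [hb, PySem.List.index?_cons_of_ne _ (by decide), Option.map_map]
      have hcomp : ((fun sep => List.drop (sep + 1) (l :: rest)) ∘ (fun x => x + 1)) =
          (fun sep => List.drop (sep + 1) rest) := by
        funext sep; simp [List.drop_succ_cons]
      rw [hcomp, ← ih]
      rcases Bool.and_eq_false_iff.mp hb with h1 | h2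
      · simp only [decide_eq_false_iff_not, not_not] at h1
        simp [findSep, h1]
      · simp only [findSep]
        split_ifs with hh hd
        · rfl
        · rw [hd] at h2; cases h2
        · rfl

-- B's pad count locates exactly skipBlank's suffix
lemma skipBlank_eq_pad (rest : List String) :
    skipBlank rest =
      (if padCount (rest.map PySem.Str.strip) < rest.length
       then some (rest.drop (padCount (rest.map PySem.Str.strip))) else none) := by
  induction rest with
  | nil => rfl
  | cons l r ih =>
    simp only [List.map_cons, skipBlank, padCount, List.length_cons]
    by_cases h : PySem.Str.strip l = ""
    · simp only [h, ne_eq, not_true_eq_false, if_false, if_true, ih]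
      split_ifs with h1 h2 h2
      · rw [List.drop_succ_cons]
      · omega
      · omega
      · rfl
    · have hne : PySem.Str.strip l ≠ "" := h
      rw [if_pos hne, if_neg h]
      have : (0 : Nat) < r.length + 1 := by omega
      rw [if_pos this]
      rfl

lemma B_eq_specMid (lines : List String) :
    clean_headers_and_borders_alt lines = specMid lines := by
  simp only [clean_headers_and_borders_alt, specMid]
  rw [List.map_map]
  have hfun : ((fun s => decide (s ≠ "") && (PySem.Str.stripChars s "-" == "")) ∘ PySem.Str.strip)
      = (fun l => decide (PySem.Str.strip l ≠ "") && (PySem.Str.strip l).toList.all (· == '-')) := by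
    funext l; exact dash_test _
  rw [hfun, findSep_eq_index]
  cases hidx : PySem.List.index?
      (lines.map (fun l => decide (PySem.Str.strip l ≠ "") && (PySem.Str.strip l).toList.all (· == '-'))) true with
  | none => rfl
  | some sep =>
    simp only [Option.map_some]
    have hslice : PySem.List.slice (lines.map PySem.Str.strip) (some ((sep : Int) + 1)) none
        = (lines.drop (sep + 1)).map PySem.Str.strip := by
      rw [show ((sep : Int) + 1) = ((sep + 1 : Nat) : Int) by push_cast; ring,
        PySem.List.slice_from_natCast, List.map_drop]
    rw [hslice]
    have hslice2 : PySem.List.slice lines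
        (some ((sep : Int) + 1 + (padCount ((lines.drop (sep + 1)).map PySem.Str.strip) : Int))) none
        = (lines.drop (sep + 1)).drop (padCount ((lines.drop (sep + 1)).map PySem.Str.strip)) := by
      rw [show ((sep : Int) + 1 + (padCount ((lines.drop (sep + 1)).map PySem.Str.strip) : Int))
          = ((sep + 1 + padCount ((lines.drop (sep + 1)).map PySem.Str.strip) : Nat) : Int) by push_cast; ring,
        PySem.List.slice_from_natCast, List.drop_drop]
    rw [hslice2, skipBlank_eq_pad]
    by_cases hp : padCount ((lines.drop (sep + 1)).map PySem.Str.strip) < (lines.drop (sep + 1)).length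
    · rw [if_pos hp]
      have hne : (lines.drop (sep + 1)).drop (padCount ((lines.drop (sep + 1)).map PySem.Str.strip)) ≠ [] := by
        rw [ne_eq, List.drop_eq_nil_iff]; omega
      cases htail : (lines.drop (sep + 1)).drop (padCount ((lines.drop (sep + 1)).map PySem.Str.strip)) with
      | nil => exact absurd htail hne
      | cons t0 tl => simp only [dedentTail]
    · rw [if_neg hp]
      have : (lines.drop (sep + 1)).drop (padCount ((lines.drop (sep + 1)).map PySem.Str.strip)) = [] := by
        rw [List.drop_eq_nil_iff]; omega
      rw [this]

-- ===== VERDICT (by name: the statement is the Claim_ definition above) =====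
theorem clean_headers_and_borders_spec : Claim_equal_clean_headers_and_borders := by
  intro lines _
  show clean_headers_and_borders lines = clean_headers_and_borders_alt lines
  rw [A_eq_specMid, B_eq_specMid]
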